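-- pv_equiv track=rewrite | github.com/ubsuny/CP1-24-midterm | abruns123/code/direction_of_motion.py | make_end_zero
-- ===== SOURCE A (Python) =====
-- def make_end_zero(direction):
--     """
--     make_end_zero makes absolutely sure
--     that the direction of motion at the end
--     of the direction list is zero
--     """
--
--     #First, it determines whether the initial motion
--     #of the elevator is in the positive or negative
--     #z-direction
--     negative=False
--     positive=False
--     for i in direction:
--         if i>0:
--             positive=True
--             break
--         if i<0:
--             negative=True
--             break
--
--     #Now, if there is a jostle as the elevator comes to a stop,
--     #it will be detected and the rest of the acceleration values
--     #after the direction of motion changes will become zero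
--     l=len(direction)
--     if positive is True:
--         for i in range(l):
--             if direction[i]<0:
--                 for j in range(i,l):
--                     direction[j]=0
--
--     if negative is True:
--         for i in range(l):
--             if direction[i]>0:
--                 for j in range(i,l):
--                     direction[j]=0
--
--     #If no jostle is detected, the final direction value is
--     #set to zero just to make sure that the behavior of the
--     #elevator stopping is conveyed.
--     if direction[l-1]!=0:
--         direction[l-1]=0
--     return direction
-- ===== SOURCE B (Python) =====
-- def make_end_zero(direction):
--     """Single streaming pass with a small state machine: emit each value until
--     the sign of motion reverses, emit zeros afterwards; if no reversal is seen,
--     zero the final emitted value. Mutates `direction` in place like the original."""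
--     out = []
--     sign = 0
--     flipped = False
--     for x in direction:
--         if flipped or sign * x < 0:
--             flipped = True
--             out.append(0)
--         else:
--             if sign == 0 and x != 0:
--                 sign = 1 if x > 0 else -1
--             out.append(x)
--     if not flipped:
--         out[-1] = 0
--     direction[:] = out
--     return direction
-- ===== Notes on version B (the rewrite author's own statement) =====
-- stated objective: alternative
-- what changed: A stages a sign-detection scan, two full index-loops with an inner tail-zeroing loop mutating the input in place and a final fix-up; B is one streaming pass with a three-field state machine (output accumulator, current sign, flipped flag) that builds the output element by element and never indexes the input.
import Mathlib
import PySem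

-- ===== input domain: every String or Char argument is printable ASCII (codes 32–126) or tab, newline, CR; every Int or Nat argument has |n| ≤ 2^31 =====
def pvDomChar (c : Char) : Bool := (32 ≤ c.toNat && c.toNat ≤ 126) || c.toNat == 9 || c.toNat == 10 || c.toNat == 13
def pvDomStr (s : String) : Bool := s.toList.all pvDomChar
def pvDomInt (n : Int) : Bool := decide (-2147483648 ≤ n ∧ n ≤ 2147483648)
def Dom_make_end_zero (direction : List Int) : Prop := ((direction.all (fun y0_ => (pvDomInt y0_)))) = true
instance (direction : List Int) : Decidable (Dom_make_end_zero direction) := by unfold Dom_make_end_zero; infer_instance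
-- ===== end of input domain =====

-- B replaces A's staged index-loops over the input by one streaming state-machine pass that
-- builds a fresh output list; both Pythons mutate the argument in place, the equivalence proved
-- here is about the returned value.
-- ===== PORT A =====
-- first loop of A: walk the list, set positive/negative on the first nonzero and break
def firstSignA : List Int → Bool × Bool
  | [] => (false, false)
  | i :: rest => if i > 0 then (false, true) else if i < 0 then (true, false) else firstSignA rest

def make_end_zero (direction : List Int) : List Int :=
  let np := firstSignA direction
  let l : Int := direction.length
  let d1 :=
    if np.2 = true then
      (PySem.List.pyRange 0 l 1).foldl
        (fun d i =>
          if PySem.List.pyGetD d i 0 < 0 then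
            (PySem.List.pyRange i l 1).foldl (fun d j => PySem.List.pySetD d j 0) d
          else d) direction
    else direction
  let d2 :=
    if np.1 = true then
      (PySem.List.pyRange 0 l 1).foldl
        (fun d i =>
          if PySem.List.pyGetD d i 0 > 0 then
            (PySem.List.pyRange i l 1).foldl (fun d j => PySem.List.pySetD d j 0) d
          else d) d1
    else d1
  if PySem.List.pyGetD d2 (l - 1) 0 ≠ 0 then PySem.List.pySetD d2 (l - 1) 0 else d2

-- ===== PORT B =====
-- the body of B's single `for x in direction` loop: state = (out, sign, flipped)
def mezStep (st : List Int × Int × Bool) (x : Int) : List Int × Int × Bool :=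
  if st.2.2 || decide (st.2.1 * x < 0) then (st.1 ++ [0], st.2.1, true)
  else if st.2.1 == 0 && x != 0 then (st.1 ++ [x], if x > 0 then 1 else -1, false)
  else (st.1 ++ [x], st.2.1, false)

def make_end_zero_alt (direction : List Int) : List Int :=
  let st := direction.foldl mezStep ([], 0, false)
  -- `if not flipped: out[-1] = 0`
  if st.2.2 then st.1 else PySem.List.pySetD st.1 (-1) 0

-- ===== PRECONDITION & SPEC =====
-- Pre_ excludes only the empty list, on which both Pythons raise IndexError.
def Pre_make_end_zero (direction : List Int) : Prop := direction ≠ []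
instance (direction : List Int) : Decidable (Pre_make_end_zero direction) := by
  unfold Pre_make_end_zero; infer_instance
def pvWitness_make_end_zero : List Int := [1, -1, 2]

def Spec_make_end_zero (direction : List Int) (out : List Int) : Prop := out = make_end_zero_alt direction
instance (direction : List Int) (out : List Int) : Decidable (Spec_make_end_zero direction out) := by unfold Spec_make_end_zero; infer_instance

-- ===== CLAIM (what is proved, stated in full; the proofs are below) =====
def Claim_equal_make_end_zero : Prop := ∀ (direction : List Int), Dom_make_end_zero direction → Pre_make_end_zero direction → Spec_make_end_zero direction (make_end_zero direction)

-- ===== LEMMAS AND PROOFS =====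

-- sign of the first nonzero element (0 if none); characterises both A's first loop
-- and the sign field of B's state machine
def firstSignB : List Int → Int
  | [] => 0
  | x :: rest => if x ≠ 0 then (if x > 0 then 1 else -1) else firstSignB rest

lemma firstSignB_cases (d : List Int) :
    firstSignB d = 0 ∨ firstSignB d = 1 ∨ firstSignB d = -1 := by
  induction d with
  | nil => simp [firstSignB]
  | cons x rest ih =>
    by_cases h : x = 0
    · simpa [firstSignB, h] using ih
    · simp only [firstSignB, h, ne_eq, not_false_eq_true, if_true]
      split <;> simp

lemma firstSignA_eq (d : List Int) :
    firstSignA d = (firstSignB d == -1, firstSignB d == 1) := by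
  induction d with
  | nil => simp [firstSignA, firstSignB]
  | cons x rest ih =>
    rcases lt_trichotomy x 0 with h | h | h
    · simp [firstSignA, firstSignB, h, not_lt.mpr (le_of_lt h), h.ne]
    · simp [firstSignA, firstSignB, h, ih]
    · simp [firstSignA, firstSignB, h, h.ne']

-- ----- B's state machine -----

-- once flipped, the loop only appends zeros
lemma mez_flipped (rest : List Int) : ∀ (out : List Int) (s : Int),
    rest.foldl mezStep (out, s, true) = (out ++ List.replicate rest.length 0, s, true) := by
  induction rest with
  | nil => intro out s; simp
  | cons x t ih =>
    intro out s
    simp only [List.foldl_cons, mezStep, Bool.true_or, if_pos]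
    rw [ih]
    simp [List.replicate_succ, List.append_assoc]

-- with the sign established, the loop copies until the first opposite-signed element
lemma mez_signed (s : Int) (hs : s = 1 ∨ s = -1) (rest : List Int) : ∀ (out : List Int),
    rest.foldl mezStep (out, s, false) =
      match rest.findIdx? (fun x => decide (x * s < 0)) with
      | none => (out ++ rest, s, false)
      | some k => (out ++ (rest.take k ++ List.replicate (rest.length - k) 0), s, true) := by
  induction rest with
  | nil => intro out; simp
  | cons x t ih =>
    intro out
    by_cases h : x * s < 0
    · simp only [List.foldl_cons, mezStep, Bool.false_or]
      rw [if_pos (by simpa [mul_comm] using h)]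
      rw [mez_flipped]
      simp [List.findIdx?_cons, h, List.replicate_succ, List.append_assoc]
    · have hne : ¬ (s == 0 && x != 0) = true := by
        rcases hs with h1 | h1 <;> simp [h1]
      simp only [List.foldl_cons, mezStep, Bool.false_or]
      rw [if_neg (by simpa [mul_comm] using h), if_neg hne]
      rw [ih (out ++ [x])]
      simp only [List.findIdx?_cons, h, decide_false]
      cases hf : t.findIdx? (fun x => decide (x * s < 0)) with
      | none => simp
      | some k => simp [List.append_assoc, List.take_succ_cons, Nat.succ_sub_succ]

-- the full loop from the initial state
lemma mez_loop (rest : List Int) : ∀ (out : List Int),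
    rest.foldl mezStep (out, 0, false) =
      match rest.findIdx? (fun x => decide (x * firstSignB rest < 0)) with
      | none => (out ++ rest, firstSignB rest, false)
      | some k => (out ++ (rest.take k ++ List.replicate (rest.length - k) 0), firstSignB rest, true) := by
  induction rest with
  | nil => intro out; simp [firstSignB]
  | cons x t ih =>
    intro out
    by_cases hx : x = 0
    · subst hx
      simp only [List.foldl_cons, mezStep, Bool.false_or, mul_zero]
      rw [if_neg (by simp), if_neg (by simp)]
      rw [ih (out ++ [0])]
      have hfs : firstSignB ((0:Int) :: t) = firstSignB t := by simp [firstSignB]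
      rw [hfs]
      simp only [List.findIdx?_cons, zero_mul, lt_irrefl, decide_false]
      cases hf : t.findIdx? (fun y => decide (y * firstSignB t < 0)) with
      | none => simp
      | some k => simp [List.append_assoc, List.take_succ_cons, Nat.succ_sub_succ]
    · have hs' : firstSignB (x :: t) = if x > 0 then 1 else -1 := by simp [firstSignB, hx]
      have hs'' : (if x > (0:Int) then (1:Int) else -1) = 1 ∨ (if x > (0:Int) then (1:Int) else -1) = -1 := by
        split <;> simp
      have hhead : ¬ x * firstSignB (x :: t) < 0 := by
        rw [hs']; rcases lt_trichotomy x 0 with h | h | h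
        · rw [if_neg (by omega)]; nlinarith
        · exact absurd h hx
        · rw [if_pos h]; nlinarith
      simp only [List.foldl_cons, mezStep, Bool.false_or, zero_mul]
      rw [if_neg (by simp), if_pos (by simp [hx])]
      rw [mez_signed _ hs'' t (out ++ [x])]
      rw [show (x :: t).findIdx? (fun y => decide (y * firstSignB (x :: t) < 0))
            = ((t.findIdx? (fun y => decide (y * (if x > 0 then 1 else -1) < 0))).map (· + 1)) by
        rw [List.findIdx?_cons, if_neg (by simpa [hs'] using hhead), hs']]
      rw [hs']
      cases hf : t.findIdx? (fun y => decide (y * (if x > 0 then 1 else -1) < 0)) with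
      | none => simp
      | some k => simp [List.append_assoc, List.take_succ_cons, Nat.succ_sub_succ]

-- Python's `out[-1] = 0` on a nonempty list
lemma pySetD_neg_one (d : List Int) (h : d ≠ []) :
    PySem.List.pySetD d (-1) 0 = d.take (d.length - 1) ++ [0] := by
  have hlen : 0 < d.length := List.length_pos_iff.mpr h
  simp only [PySem.List.pySetD, PySem.List.pySet?, PySem.List.pyIdx?]
  rw [if_neg (by omega), if_pos (by omega)]
  simp only [Option.map_some, Option.getD_some]
  rw [List.set_eq_take_append_cons_drop, if_pos (by omega)]
  rw [show (- -(1:Int)).toNat = 1 from rfl]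
  rw [show d.length - 1 + 1 = d.length by omega, List.drop_length]

-- B's result, characterised by the first index whose sign opposes the first motion
lemma alt_eq (d : List Int) (h : d ≠ []) :
    make_end_zero_alt d =
      match d.findIdx? (fun x => decide (x * firstSignB d < 0)) with
      | none => d.take (d.length - 1) ++ [0]
      | some k => d.take k ++ List.replicate (d.length - k) 0 := by
  unfold make_end_zero_alt
  rw [mez_loop d []]
  cases hf : d.findIdx? (fun x => decide (x * firstSignB d < 0)) with
  | none => simp [pySetD_neg_one d h]
  | some k => simp

-- ----- A's passes -----

lemma set_take_succ (d : List Int) (k : Nat) (h : k < d.length) :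
    (d.set k 0).take (k+1) = d.take k ++ [0] := by
  rw [List.take_succ_eq_append_getElem (by simpa using h)]
  rw [List.take_set, List.getElem_set_self (by simpa using h)]
  rw [List.set_eq_of_length_le (by simp)]

-- inner loop of A's passes: `for j in range(i, l): d[j] = 0` zeroes the tail of the state
lemma zeroFrom_eq (n : Nat) : ∀ (d : List Int) (i : Int), 0 ≤ i → i + n = d.length →
    (PySem.List.pyRange i (d.length : Int) 1).foldl (fun e j => PySem.List.pySetD e j 0) d
      = d.take i.toNat ++ List.replicate n 0 := by
  induction n with
  | zero =>
    intro d i h0 hn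
    rw [PySem.List.pyRange_one_eq_nil (by omega)]
    simp
    omega
  | succ n ih =>
    intro d i h0 hn
    rw [PySem.List.pyRange_one_cons (by omega)]
    simp only [List.foldl_cons]
    rw [PySem.List.pySetD_of_nonneg _ _ h0]
    have hlen : (d.set i.toNat 0).length = d.length := by simp
    have h2 := ih (d.set i.toNat 0) (i + 1) (by omega) (by simp; omega)
    rw [hlen] at h2
    rw [h2]
    have h3 : (i+1).toNat = i.toNat + 1 := by omega
    rw [h3, set_take_succ d i.toNat (by omega)]
    simp [List.replicate_succ]

-- a stretch of A's pass over indices where the test never fires leaves the state unchanged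
lemma pass_skip (p : Int → Prop) [DecidablePred p] (L b : Int) (n : Nat) :
    ∀ (e : List Int) (a : Int), (b - a).toNat = n →
    (∀ j : Int, a ≤ j → j < b → ¬ p (PySem.List.pyGetD e j 0)) →
    (PySem.List.pyRange a b 1).foldl
      (fun d i =>
        if p (PySem.List.pyGetD d i 0) then
          (PySem.List.pyRange i L 1).foldl (fun d j => PySem.List.pySetD d j 0) d
        else d) e = e := by
  induction n with
  | zero =>
    intro e a hn _
    rw [PySem.List.pyRange_one_eq_nil (by omega)]
    rfl
  | succ n ih =>
    intro e a hn h
    rw [PySem.List.pyRange_one_cons (by omega)]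
    simp only [List.foldl_cons]
    rw [if_neg (h a le_rfl (by omega))]
    exact ih e (a+1) (by omega) (fun j hj hjb => h j (by omega) hjb)

-- a full pass of A: input unchanged before the first index satisfying p, zeros from it on
lemma pass_eq (p : Int → Prop) [DecidablePred p] (hp0 : ¬ p 0) (d : List Int) :
    (PySem.List.pyRange 0 (d.length : Int) 1).foldl
      (fun e i =>
        if p (PySem.List.pyGetD e i 0) then
          (PySem.List.pyRange i (d.length : Int) 1).foldl (fun e j => PySem.List.pySetD e j 0) e
        else e) d
    = match d.findIdx? (fun x => decide (p x)) with
      | some k => d.take k ++ List.replicate (d.length - k) 0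
      | none => d := by
  cases hf : d.findIdx? (fun x => decide (p x)) with
  | none =>
    have hall := List.findIdx?_eq_none_iff.mp hf
    exact pass_skip p _ _ _ d 0 rfl (fun j hj hjL => by
      have hmem : PySem.List.pyGetD d j 0 ∈ d :=
        PySem.List.pyGetD_mem d 0 ⟨by omega, by omega⟩
      simpa using hall _ hmem)
  | some k =>
    obtain ⟨hk, hpk, hbefore⟩ := List.findIdx?_eq_some_iff_getElem.mp hf
    rw [PySem.List.pyRange_one_append 0 (k : Int) (d.length : Int) (by omega) (by omega),
        List.foldl_append]
    rw [pass_skip p _ _ ((k:Int) - 0).toNat d 0 rfl (fun j hj hjk => by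
      rw [PySem.List.pyGetD_eq_getElem _ _ hj (by omega)]
      simpa using hbefore j.toNat (by omega))]
    rw [PySem.List.pyRange_one_cons (by omega), List.foldl_cons]
    rw [if_pos (by
      rw [PySem.List.pyGetD_eq_getElem _ _ (by omega) (by omega)]
      simpa using hpk)]
    have hz := zeroFrom_eq (d.length - k) d (k : Int) (by omega) (by omega)
    simp only [Int.toNat_natCast] at hz
    rw [hz]
    have hel : (d.take k ++ List.replicate (d.length - k) 0).length = d.length := by
      simp; omega
    refine pass_skip p _ _ ((d.length : Int) - ((k:Int)+1)).toNat _ ((k:Int)+1) rfl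
      (fun j hj hjL => ?_)
    have hg : PySem.List.pyGetD (d.take k ++ List.replicate (d.length - k) 0) j 0 = 0 := by
      rw [PySem.List.pyGetD_eq_getElem _ _ (by omega) (by rw [hel]; omega)]
      rw [List.getElem_append_right (by simp; omega)]
      simp
    rw [hg]; exact hp0

-- A's last statement always turns the final entry into 0
lemma final_eq (e : List Int) (h : e ≠ []) (L : Int) (hL : L = e.length) :
    (if PySem.List.pyGetD e (L - 1) 0 = 0 then e else PySem.List.pySetD e (L - 1) 0)
      = e.take (e.length - 1) ++ [0] := by
  have hlen : 0 < e.length := List.length_pos_iff.mpr h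
  have hget : PySem.List.pyGetD e (L - 1) 0 = e[e.length - 1]'(by omega) := by
    rw [PySem.List.pyGetD_eq_getElem _ _ (by omega) (by omega)]
    congr 1
    omega
  by_cases hz : e[e.length - 1]'(by omega) = 0
  · rw [if_pos (by rw [hget]; simpa using hz)]
    conv_lhs => rw [← List.take_length (l := e)]
    rw [show e.length = (e.length - 1) + 1 by omega,
        List.take_succ_eq_append_getElem (by omega), hz]
    norm_num
  · rw [if_neg (by rw [hget]; simpa using hz)]
    rw [PySem.List.pySetD_of_nonneg _ _ (by omega)]
    rw [List.set_eq_take_append_cons_drop, if_pos (by omega)]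
    have : (L - 1).toNat = e.length - 1 := by omega
    rw [this, show e.length - 1 + 1 = e.length by omega, List.drop_length]

lemma take_pred_zero_tail (d : List Int) (k : Nat) (hk : k < d.length) :
    (d.take k ++ List.replicate (d.length - k) 0).take
        ((d.take k ++ List.replicate (d.length - k) 0).length - 1) ++ [0]
      = d.take k ++ List.replicate (d.length - k) 0 := by
  have h1 : (d.take k ++ List.replicate (d.length - k) 0).length = d.length := by simp; omega
  rw [h1, List.take_append]
  rw [List.take_of_length_le (by simp; omega), List.take_replicate]
  rw [List.append_assoc]
  congr 1
  rw [show min (d.length - 1 - (d.take k).length) (d.length - k) = d.length - 1 - k by simp; omega]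
  rw [show d.length - k = (d.length - 1 - k) + 1 by omega, List.replicate_succ']

-- A's final fix-up leaves a zeroed tail unchanged
lemma cut_case (d : List Int) (k : Nat) (hk : k < d.length) :
    (if PySem.List.pyGetD (d.take k ++ List.replicate (d.length - k) 0)
          ((d.length : Int) - 1) 0 = 0 then d.take k ++ List.replicate (d.length - k) 0
     else PySem.List.pySetD (d.take k ++ List.replicate (d.length - k) 0)
          ((d.length : Int) - 1) 0)
      = d.take k ++ List.replicate (d.length - k) 0 := by
  have hne : d.take k ++ List.replicate (d.length - k) 0 ≠ [] :=
    List.ne_nil_of_length_pos (by simp [List.length_append]; omega)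
  rw [final_eq _ hne ((d.length : Int))
        (by push_cast [List.length_append, List.length_take, List.length_replicate]; omega)]
  exact take_pred_zero_tail d k hk

-- ===== VERDICT (by name: the statement is the Claim_ definition above) =====
theorem make_end_zero_spec : Claim_equal_make_end_zero := by
  intro d _hdom hpre
  unfold Spec_make_end_zero make_end_zero Pre_make_end_zero at *
  have hlen : 0 < d.length := List.length_pos_iff.mpr hpre
  rw [alt_eq d hpre]
  simp only [firstSignA_eq]
  rcases firstSignB_cases d with hs | hs | hs <;> rw [hs]
  · -- sign = 0 : both A's passes skipped, B finds no reversal; both zero the last entry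
    have hf : d.findIdx? (fun x => decide (x * 0 < 0)) = none :=
      List.findIdx?_eq_none_iff.mpr (by simp)
    rw [hf]
    norm_num
    exact final_eq d hpre _ rfl
  · -- sign = 1 : A's positive pass runs with test (· < 0); B's predicate x*1<0 is the same
    have hp : (fun x : Int => decide (x * 1 < 0)) = (fun x : Int => decide (x < 0)) := by
      funext x; simp
    rw [hp]
    norm_num
    rw [pass_eq (fun x => x < 0) (by omega) d]
    cases hf : d.findIdx? (fun x => decide (x < 0)) with
    | none => exact final_eq d hpre _ rfl
    | some k =>
      have hk : k < d.length := (List.findIdx?_eq_some_iff_getElem.mp hf).1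
      exact cut_case d k hk
  · -- sign = -1 : A's negative pass runs with test (· > 0); B's predicate x*(-1)<0 is the same
    have hp : (fun x : Int => decide (x * (-1) < 0)) = (fun x : Int => decide (x > 0)) := by
      funext x; congr 1; rw [eq_iff_iff]; constructor <;> intro h <;> nlinarith
    rw [hp]
    norm_num
    rw [pass_eq (fun x => x > 0) (by omega) d]
    cases hf : d.findIdx? (fun x => decide (x > 0)) with
    | none => exact final_eq d hpre _ rfl
    | some k =>
      have hk : k < d.length := (List.findIdx?_eq_some_iff_getElem.mp hf).1
      exact cut_case d k hk
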